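-- pv_equiv track=rewrite | github.com/WhenWen/levanter | src/levanter/optim/soap.py | _sort_and_group_matrices
-- ===== SOURCE A (Python) =====
-- from typing import List, NamedTuple, Optional, Union, Any, Tuple
-- from collections import defaultdict
--
-- def _sort_and_group_matrices(matrix_shapes: List[Tuple[int, ...]]):
--     indexed_list = list(enumerate(matrix_shapes))
--     sorted_indexed = sorted(indexed_list, key=lambda x: x[1])
--     sorted_shapes = [shape for _, shape in sorted_indexed]
--     change_indices = [original_index for original_index, _ in sorted_indexed]
--     revert_indices = [0] * len(matrix_shapes)
--     for new_pos, (original_index, _) in enumerate(sorted_indexed):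
--         revert_indices[original_index] = new_pos
--     shape_groups = defaultdict(list)
--     for i, shape in enumerate(sorted_shapes):
--         shape_groups[shape].append(i)
--     unique_sorted_shapes = list(shape_groups.keys())
--     return unique_sorted_shapes, dict(shape_groups), change_indices, revert_indices
-- ===== SOURCE B (Python) =====
-- def _sort_and_group_matrices(matrix_shapes):
--     buckets = {}
--     for i, shape in enumerate(matrix_shapes):
--         buckets.setdefault(shape, []).append(i)
--     unique_sorted_shapes = sorted(buckets)
--     change_indices = [i for shape in unique_sorted_shapes for i in buckets[shape]]
--     shape_groups = {}
--     pos = 0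
--     for shape in unique_sorted_shapes:
--         k = len(buckets[shape])
--         shape_groups[shape] = list(range(pos, pos + k))
--         pos += k
--     revert_indices = [0] * len(matrix_shapes)
--     for new_pos, original_index in enumerate(change_indices):
--         revert_indices[original_index] = new_pos
--     return unique_sorted_shapes, shape_groups, change_indices, revert_indices
-- ===== Notes on version B (the rewrite author's own statement) =====
-- stated objective: alternative
-- what changed: B never performs A's stable sort of all n (index, shape) pairs: it buckets original indices by shape in one dict pass, sorts only the distinct shapes, concatenates the buckets in that order to get the change/revert permutations, and assigns each shape's group as a contiguous range of positions from a running counter instead of A's per-element defaultdict-append over the sorted shape list.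
import Mathlib
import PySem

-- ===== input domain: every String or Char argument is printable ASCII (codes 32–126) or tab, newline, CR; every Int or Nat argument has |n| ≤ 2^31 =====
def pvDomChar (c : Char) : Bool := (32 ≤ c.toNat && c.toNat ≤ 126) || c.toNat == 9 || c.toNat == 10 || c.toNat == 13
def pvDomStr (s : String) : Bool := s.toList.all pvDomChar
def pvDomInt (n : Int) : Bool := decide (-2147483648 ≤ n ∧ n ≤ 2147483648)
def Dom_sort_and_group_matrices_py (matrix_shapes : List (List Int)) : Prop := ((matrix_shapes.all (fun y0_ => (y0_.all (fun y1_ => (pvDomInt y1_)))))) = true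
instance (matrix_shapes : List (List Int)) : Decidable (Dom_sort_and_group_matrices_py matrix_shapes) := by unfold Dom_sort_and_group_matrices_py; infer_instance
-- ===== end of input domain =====

-- B replaces A's full stable sort of (index, shape) pairs by a different algorithm: it buckets the
-- original indices by shape in one dict pass, sorts only the distinct shapes, and emits the output
-- order, group ranges and running positions from the buckets (objective: alternative, same result).

-- ===== PORT A =====
-- Python list assignment xs[i] = v; exact for 0 ≤ i < len xs, the only indices the revert loops produce
def pvSetAt (xs : List Int) (i : Int) (v : Int) : List Int := xs.set i.toNat v

def sort_and_group_matrices_py (matrix_shapes : List (List Int)) :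
    List (List Int) × (List (List Int × List Int)) × List Int × List Int :=
  let indexed_list := PySem.List.enumerate matrix_shapes
  let sorted_indexed := PySem.List.sorted indexed_list (fun x => x.2)
  let sorted_shapes := sorted_indexed.map (fun p => p.2)
  let change_indices := sorted_indexed.map (fun p => p.1)
  let revert_indices := (PySem.List.enumerate sorted_indexed).foldl
      (fun r q => pvSetAt r q.2.1 q.1) (List.replicate matrix_shapes.length 0)
  let shape_groups := (PySem.List.enumerate sorted_shapes).foldl
      (fun d p => d.modify p.2 ([] : List Int) (fun l => l ++ [p.1])) PySem.Dict.empty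
  let unique_sorted_shapes := shape_groups.keys
  (unique_sorted_shapes, shape_groups.items, change_indices, revert_indices)

-- ===== PORT B =====
def sort_and_group_matrices_py_alt (matrix_shapes : List (List Int)) :
    List (List Int) × (List (List Int × List Int)) × List Int × List Int :=
  -- buckets[shape] = original indices carrying that shape (setdefault(...).append = modify with default [])
  let buckets : PySem.Dict (List Int) (List Int) := (PySem.List.enumerate matrix_shapes).foldl
      (fun d p => d.modify p.2 ([] : List Int) (fun l => l ++ [p.1])) PySem.Dict.empty
  let unique_sorted_shapes := PySem.List.sorted buckets.keys (fun s => s)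
  let change_indices := unique_sorted_shapes.flatMap (fun s => buckets.getD s [])
  -- running-position loop; buckets[shape] is always present for shape ∈ keys, so getD is exact
  let groups_pos := unique_sorted_shapes.foldl
      (fun st s =>
        let k := PySem.List.len (buckets.getD s [])
        (st.1.insert s (PySem.List.pyRange st.2 (st.2 + k)), st.2 + k))
      ((PySem.Dict.empty : PySem.Dict (List Int) (List Int)), (0 : Int))
  let revert_indices := (PySem.List.enumerate change_indices).foldl
      (fun r q => pvSetAt r q.2 q.1) (List.replicate matrix_shapes.length 0)
  (unique_sorted_shapes, groups_pos.1.items, change_indices, revert_indices)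

-- ===== PRECONDITION & SPEC =====
def Spec_sort_and_group_matrices_py (matrix_shapes : List (List Int)) (out : List (List Int) × (List (List Int × List Int)) × List Int × List Int) : Prop := out = sort_and_group_matrices_py_alt matrix_shapes
instance (matrix_shapes : List (List Int)) (out : List (List Int) × (List (List Int × List Int)) × List Int × List Int) : Decidable (Spec_sort_and_group_matrices_py matrix_shapes out) := by unfold Spec_sort_and_group_matrices_py; infer_instance

-- ===== CLAIM (what is proved, stated in full; the proofs are below) =====
def Claim_equal_sort_and_group_matrices_py : Prop := ∀ (matrix_shapes : List (List Int)), Dom_sort_and_group_matrices_py matrix_shapes → Spec_sort_and_group_matrices_py matrix_shapes (sort_and_group_matrices_py matrix_shapes)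

-- ===== LEMMAS AND PROOFS =====

-- strict "stable order" on enumerated pairs: by shape, ties by original index
def pvR (p q : Int × List Int) : Prop := p.2 < q.2 ∨ (p.2 = q.2 ∧ p.1 < q.1)

theorem pv_insertBy_pairwise (x : Int × List Int) :
    ∀ (acc : List (Int × List Int)), acc.Pairwise pvR → (∀ y ∈ acc, y.1 < x.1) →
      (PySem.List.insertBy (fun a b => decide (a.2 < b.2)) x acc).Pairwise pvR
  | [], _, _ => by simp [PySem.List.insertBy]
  | y :: ys, hacc, hall => by
      simp only [PySem.List.insertBy]
      by_cases h : x.2 < y.2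
      · simp only [h, decide_true, if_true]
        refine List.Pairwise.cons (fun z hz => ?_) hacc
        rcases List.mem_cons.mp hz with rfl | hz
        · exact Or.inl h
        · rcases (List.pairwise_cons.mp hacc).1 z hz with h2 | ⟨h2, _⟩
          · exact Or.inl (lt_trans h h2)
          · exact Or.inl (h2 ▸ h)
      · simp only [h, decide_false]
        refine List.Pairwise.cons (fun z hz => ?_) ?_
        · rcases (PySem.List.mem_insertBy _ _ _ _).mp hz with rfl | hz
          · rcases lt_or_eq_of_le (le_of_not_gt h) with h2 | h2
            · exact Or.inl h2
            · exact Or.inr ⟨h2, hall y (by simp)⟩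
          · exact (List.pairwise_cons.mp hacc).1 z hz
        · exact pv_insertBy_pairwise x ys (List.pairwise_cons.mp hacc).2
            (fun z hz => hall z (by simp [hz]))

theorem pv_foldl_insertBy_pairwise :
    ∀ (xs acc : List (Int × List Int)), xs.Pairwise (fun p q => p.1 < q.1) →
      acc.Pairwise pvR → (∀ y ∈ acc, ∀ x ∈ xs, y.1 < x.1) →
      (xs.foldl (fun acc x => PySem.List.insertBy (fun a b => decide (a.2 < b.2)) x acc) acc).Pairwise pvR
  | [], acc, _, hacc, _ => hacc
  | x :: xs, acc, hxs, hacc, hall => by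
      simp only [List.foldl_cons]
      refine pv_foldl_insertBy_pairwise xs _ (List.pairwise_cons.mp hxs).2
        (pv_insertBy_pairwise x acc hacc (fun y hy => hall y hy x (by simp))) ?_
      intro y hy z hz
      rcases (PySem.List.mem_insertBy _ _ _ _).mp hy with rfl | hy
      · exact (List.pairwise_cons.mp hxs).1 z hz
      · exact hall y hy z (by simp [hz])

theorem pv_sorted_enumerate_pairwise (ms : List (List Int)) :
    (PySem.List.sorted (PySem.List.enumerate ms) (fun p => p.2)).Pairwise pvR := by
  rw [PySem.List.sorted_eq_foldl_insertBy]
  exact pv_foldl_insertBy_pairwise _ [] (PySem.List.pairwise_lt_enumerate ms 0)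
    (List.Pairwise.nil) (by simp)

theorem pv_partition_perm :
    ∀ (us : List (List Int)) (l : List (Int × List Int)), us.Nodup → (∀ p ∈ l, p.2 ∈ us) →
      (us.flatMap (fun s => l.filter (fun p => p.2 == s))).Perm l
  | [], l, _, hall => by
      have : l = [] := List.eq_nil_iff_forall_not_mem.mpr (fun p hp => by simpa using hall p hp)
      simp [this]
  | s :: us, l, hnd, hall => by
      have hstep : ∀ t ∈ us, l.filter (fun p => p.2 == t)
          = (l.filter (fun p => !(p.2 == s))).filter (fun p => p.2 == t) := by
        intro t ht
        rw [List.filter_filter]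
        refine (List.filter_congr ?_).symm
        intro p _
        by_cases hpt : p.2 = t
        · have hts : ¬ t = s := fun h => (List.nodup_cons.mp hnd).1 (h ▸ ht)
          have hpns : ¬ p.2 = s := fun hps => hts (hpt.symm.trans hps)
          simp [hpt, hts]
        · simp [hpt]
      have hrw : us.flatMap (fun t => l.filter (fun p => p.2 == t))
          = us.flatMap (fun t => (l.filter (fun p => !(p.2 == s))).filter (fun p => p.2 == t)) := by
        rw [List.flatMap_def, List.flatMap_def]
        exact congrArg List.flatten (List.map_congr_left hstep)
      have hIH : (us.flatMap (fun t => (l.filter (fun p => !(p.2 == s))).filter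
            (fun p => p.2 == t))).Perm (l.filter (fun p => !(p.2 == s))) := by
        refine pv_partition_perm us _ (List.nodup_cons.mp hnd).2 ?_
        intro p hp
        have hps : ¬ (p.2 == s) = true := by
          have := (List.mem_filter.mp hp).2; simpa using this
        rcases List.mem_cons.mp (hall p (List.mem_filter.mp hp).1) with h | h
        · exact absurd (by simp [h]) hps
        · exact h
      have h0 : (s :: us).flatMap (fun t => l.filter (fun p => p.2 == t))
          = l.filter (fun p => p.2 == s) ++ us.flatMap (fun t => l.filter (fun p => p.2 == t)) := by
        simp [List.flatMap_cons]
      rw [h0, hrw]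
      exact (List.Perm.append_left _ hIH).trans (List.filter_append_perm _ l)

-- dedup (first occurrences) is a sublist of its input
theorem pv_ofList_sublist {a : Type} [BEq a] [LawfulBEq a] :
    ∀ (xs : List a), (PySem.Set.ofList xs).Sublist xs
  | [] => by simp [PySem.Set.ofList, PySem.Set.empty]
  | x :: xs => by
      rw [PySem.Set.ofList_cons]
      refine List.Sublist.cons₂ x ?_
      have h1 : (PySem.Set.ofList xs).discard x
          = List.filter (fun y => !(y == x)) (PySem.Set.ofList xs) := rfl
      rw [h1]
      exact List.filter_sublist.trans (pv_ofList_sublist xs)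

-- running offset of shape s in the block decomposition given block sizes n
def pvOff (n : List Int → Int) : List (List Int) → List Int → Int
  | [], _ => 0
  | t :: us, s => if s = t then 0 else n t + pvOff n us s

theorem pv_filter_enum_blocks (n : List Int → Int) (f : List Int → List (List Int))
    (hn : ∀ t, n t = ((f t).length : Int)) :
    ∀ (us : List (List Int)) (s0 : Int) (s : List Int), us.Nodup → s ∈ us →
      (∀ t ∈ us, ∀ x ∈ f t, x = t) →
      ((PySem.List.enumerate (us.flatMap f) s0).filter (fun p => p.2 == s)).map (fun p => p.1)
        = PySem.List.pyRange (s0 + pvOff n us s) (s0 + pvOff n us s + n s)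
  | [], s0, s, _, hmem, _ => absurd hmem (List.not_mem_nil)
  | t :: us, s0, s, hnd, hmem, hblk => by
      rw [List.flatMap_cons, PySem.List.enumerate_append, List.filter_append, List.map_append]
      by_cases hst : s = t
      · subst hst
        have h1 : (PySem.List.enumerate (f s) s0).filter (fun p => p.2 == s)
            = PySem.List.enumerate (f s) s0 := by
          rw [List.filter_eq_self]
          intro p hp
          rcases (PySem.List.mem_enumerate_iff _ _ _).mp hp with ⟨k, hk, rfl⟩
          simp [hblk s (by simp) _ (List.getElem_mem hk)]
        have h2 : (PySem.List.enumerate (us.flatMap f) (s0 + (f s).length)).filter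
            (fun p => p.2 == s) = [] := by
          rw [List.filter_eq_nil_iff]
          intro p hp
          rcases (PySem.List.mem_enumerate_iff _ _ _).mp hp with ⟨k, hk, rfl⟩
          rcases List.mem_flatMap.mp (List.getElem_mem hk) with ⟨u, hu, hx⟩
          have : (us.flatMap f)[k] = u := hblk u (by simp [hu]) _ hx
          simp only [this, beq_iff_eq]
          exact fun h => (List.nodup_cons.mp hnd).1 (h ▸ hu)
        rw [h1, h2, PySem.List.map_fst_enumerate]
        simp only [List.map_nil, List.append_nil, pvOff, if_true]
        rw [hn]
        congr 1 <;> ring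
      · have h1 : (PySem.List.enumerate (f t) s0).filter (fun p => p.2 == s) = [] := by
          rw [List.filter_eq_nil_iff]
          intro p hp
          rcases (PySem.List.mem_enumerate_iff _ _ _).mp hp with ⟨k, hk, rfl⟩
          have : (f t)[k] = t := hblk t (by simp) _ (List.getElem_mem hk)
          simp only [this, beq_iff_eq]
          exact fun h => hst h.symm
        have h2 := pv_filter_enum_blocks n f hn us (s0 + (f t).length) s
          (List.nodup_cons.mp hnd).2 ((List.mem_cons.mp hmem).resolve_left hst)
          (fun u hu => hblk u (by simp [hu]))
        rw [h1, h2]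
        simp only [List.map_nil, List.nil_append, pvOff, if_neg hst]
        rw [hn s, hn t]
        congr 1 <;> ring

theorem pv_enumerate_map {a b : Type} (f : a → b) :
    ∀ (xs : List a) (s : Int),
      PySem.List.enumerate (xs.map f) s = (PySem.List.enumerate xs s).map (fun p => (p.1, f p.2))
  | [], s => by simp [PySem.List.enumerate_nil]
  | x :: xs, s => by
      simp [PySem.List.enumerate_cons, pv_enumerate_map f xs (s + 1)]

theorem pv_items_fold_groups (v : List Int → List Int) :
    ∀ (us : List (List Int)) (d : PySem.Dict (List Int) (List Int)) (pos : Int),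
      us.Nodup → (∀ s ∈ us, d.contains s = false) →
      ((us.foldl (fun st s =>
          let k := PySem.List.len (v s)
          (st.1.insert s (PySem.List.pyRange st.2 (st.2 + k)), st.2 + k)) (d, pos)).1).items
        = d.items ++ us.map (fun s =>
            (s, PySem.List.pyRange (pos + pvOff (fun t => PySem.List.len (v t)) us s)
                (pos + pvOff (fun t => PySem.List.len (v t)) us s + PySem.List.len (v s))))
  | [], d, pos, _, _ => by simp
  | s :: us, d, pos, hnd, hfresh => by
      simp only [List.foldl_cons, List.map_cons]
      have hins : (d.insert s (PySem.List.pyRange pos (pos + PySem.List.len (v s)))).items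
          = d.items ++ [(s, PySem.List.pyRange pos (pos + PySem.List.len (v s)))] := by
        have h := PySem.Dict.items_foldl_insert_fresh [s] (fun a => a)
          (fun a => PySem.List.pyRange pos (pos + PySem.List.len (v a))) d
          (by intro a ha; rw [List.mem_singleton] at ha; subst ha; exact hfresh a (by simp)) (by simp)
        simpa using h
      have hIH := pv_items_fold_groups v us
        (d.insert s (PySem.List.pyRange pos (pos + PySem.List.len (v s))))
        (pos + PySem.List.len (v s)) (List.nodup_cons.mp hnd).2
        (by
          intro t ht
          rw [PySem.Dict.contains_insert]
          have : t ≠ s := fun h => (List.nodup_cons.mp hnd).1 (h ▸ ht)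
          simp [this, hfresh t (by simp [ht])])
      rw [hIH, hins, List.append_assoc]
      congr 1
      rw [List.cons_append, List.nil_append]
      congr 1
      · simp [pvOff]
      · refine List.map_congr_left ?_
        intro t ht
        have hts : ¬ t = s := fun h => (List.nodup_cons.mp hnd).1 (h ▸ ht)
        simp only [pvOff, if_neg hts]
        congr 1
        ring

-- ===== VERDICT (by name: the statement is the Claim_ definition above) =====
theorem sort_and_group_matrices_py_spec : Claim_equal_sort_and_group_matrices_py := by
  intro ms _
  show sort_and_group_matrices_py ms = sort_and_group_matrices_py_alt ms
  simp only [sort_and_group_matrices_py, sort_and_group_matrices_py_alt]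
  set buckets : PySem.Dict (List Int) (List Int) := (PySem.List.enumerate ms).foldl
      (fun d p => d.modify p.2 ([] : List Int) (fun l => l ++ [p.1])) PySem.Dict.empty with hbuckets
  have hkeysB : buckets.keys = PySem.List.dedup ms := by
    rw [hbuckets, PySem.Dict.keys_foldl_modify_key (PySem.List.enumerate ms) (fun p => p.2)
      ([] : List Int) (fun _ p => fun l => l ++ [p.1]) PySem.Dict.empty]
    simp [PySem.List.map_snd_enumerate, PySem.Dict.keys_empty, PySem.Set.update_nil_left,
      PySem.List.dedup_eq_ofList]
  set us : List (List Int) := PySem.List.sorted buckets.keys (fun s => s) with hus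
  have hus' : us = PySem.List.sorted (PySem.List.dedup ms) (fun s => s) := by rw [hus, hkeysB]
  have husp : us.Pairwise (· < ·) := by
    rw [hus', PySem.List.dedup_eq_ofList]
    have h := PySem.List.sorted_ofList_pairwise_lt (κ := List Int) ms
    convert h using 2
  have husnd : us.Nodup := husp.imp (fun h => ne_of_lt h)
  have hmemus : ∀ x, x ∈ us ↔ x ∈ ms := fun x => by
    rw [hus', PySem.List.mem_sorted, PySem.List.mem_dedup]
  set g : List Int → List (Int × List Int) :=
    fun s => (PySem.List.enumerate ms).filter (fun p => p.2 == s) with hgdef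
  have hgmem : ∀ s, ∀ p ∈ g s, p.2 = s := fun s p hp => by
    have := (List.mem_filter.mp hp).2; simpa using this
  set ys : List (Int × List Int) := us.flatMap g with hysdef
  have hperm : ys.Perm (PySem.List.enumerate ms) := by
    refine pv_partition_perm us _ husnd ?_
    intro p hp
    rcases (PySem.List.mem_enumerate_iff _ _ _).mp hp with ⟨k, hk, rfl⟩
    exact (hmemus _).mpr (List.getElem_mem hk)
  have hyspw : ys.Pairwise pvR := by
    rw [hysdef]
    refine List.pairwise_flatMap.mpr ⟨?_, ?_⟩
    · intro s _
      refine ((PySem.List.pairwise_lt_enumerate ms 0).filter _).imp_of_mem ?_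
      intro p q hp hq h
      exact Or.inr ⟨(hgmem s p hp).trans (hgmem s q hq).symm, h⟩
    · refine husp.imp ?_
      intro s t hst x hx y hy
      exact Or.inl ((hgmem s x hx) ▸ (hgmem t y hy) ▸ hst)
  have hsorted : PySem.List.sorted (PySem.List.enumerate ms) (fun p => p.2) = ys := by
    refine PySem.List.eq_of_perm_of_pairwise_le_of_injective
      (fun p => toLex (p.2, p.1)) ?_ ?_ ?_ ?_
    · intro p q h
      have h2 : (p.2, p.1) = (q.2, q.1) := congrArg ofLex h
      exact Prod.ext (congrArg Prod.snd h2) (congrArg Prod.fst h2)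
    · exact (PySem.List.sorted_perm _ _ _).trans hperm.symm
    · exact (pv_sorted_enumerate_pairwise ms).imp
        (fun h => le_of_lt (Prod.Lex.toLex_lt_toLex.mpr h))
    · exact hyspw.imp (fun h => le_of_lt (Prod.Lex.toLex_lt_toLex.mpr h))
  rw [hsorted]
  -- lookups in buckets
  have hgetD : ∀ s, buckets.getD s [] = (g s).map (fun p => p.1) := by
    intro s
    have hswap : buckets = ((PySem.List.enumerate ms).map Prod.swap).foldl
        (fun d p => d.modify p.1 ([] : List Int) (fun l => l ++ [p.2])) PySem.Dict.empty := by
      rw [List.foldl_map]; rfl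
    rw [hswap, PySem.Dict.getD_foldl_modify_append]
    simp [hgdef, List.filter_map, Function.comp_def, List.map_map, Prod.swap]
  -- change_indices agree
  have hchange : ys.map (fun p => p.1) = us.flatMap (fun s => buckets.getD s []) := by
    rw [hysdef, List.map_flatMap, List.flatMap_def, List.flatMap_def]
    exact congrArg List.flatten (List.map_congr_left (fun s _ => (hgetD s).symm))
  rw [← hchange]
  -- revert_indices agree
  have hrevert : (PySem.List.enumerate ys).foldl
      (fun r q => pvSetAt r q.2.1 q.1) (List.replicate ms.length 0)
      = (PySem.List.enumerate (ys.map (fun p => p.1))).foldl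
      (fun r q => pvSetAt r q.2 q.1) (List.replicate ms.length 0) := by
    rw [pv_enumerate_map (fun p => p.1) ys 0, List.foldl_map]
  rw [← hrevert]
  -- the sorted shapes and their block decomposition
  set ss2 : List (List Int) := ys.map (fun p => p.2) with hss2
  set f : List Int → List (List Int) := fun t => (g t).map (fun p => p.2) with hfdef
  set n : List Int → Int := fun t => ((g t).length : Int) with hndef
  have hblocks2 : ss2 = us.flatMap f := by rw [hss2, hysdef, List.map_flatMap]
  have hfx : ∀ t, ∀ x ∈ f t, x = t := by
    intro t x hx
    rcases List.mem_map.mp hx with ⟨p, hp, rfl⟩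
    exact hgmem t p hp
  have hmem2 : ∀ x, x ∈ ss2 ↔ x ∈ ms := by
    intro x
    constructor
    · intro hx
      rw [hblocks2] at hx
      rcases List.mem_flatMap.mp hx with ⟨s, hs, hxf⟩
      exact (hfx s x hxf) ▸ (hmemus s).mp hs
    · intro hx
      rcases List.getElem_of_mem hx with ⟨i, hi, rfl⟩
      have hpmem : ((0 : Int) + (i : Int), ms[i]) ∈ PySem.List.enumerate ms 0 :=
        (PySem.List.mem_enumerate_iff _ _ _).mpr ⟨i, hi, rfl⟩
      have hpg : ((0 : Int) + (i : Int), ms[i]) ∈ g ms[i] :=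
        List.mem_filter.mpr ⟨hpmem, by simp⟩
      rw [hblocks2]
      exact List.mem_flatMap.mpr ⟨ms[i], (hmemus _).mpr hx,
        List.mem_map.mpr ⟨_, hpg, rfl⟩⟩
  have hss2le : ss2.Pairwise (· ≤ ·) := by
    rw [hblocks2]
    refine List.pairwise_flatMap.mpr ⟨?_, ?_⟩
    · intro s _
      have h : f s = List.replicate (f s).length s := List.eq_replicate_of_mem (hfx s)
      rw [h]
      exact List.pairwise_replicate.mpr (Or.inr le_rfl)
    · refine husp.imp ?_
      intro s t hst x hx y hy
      exact (hfx s x hx) ▸ (hfx t y hy) ▸ le_of_lt hst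
  have hdedpw : (PySem.List.dedup ss2).Pairwise (· < ·) := by
    have hsub : (PySem.List.dedup ss2).Sublist ss2 := by
      rw [PySem.List.dedup_eq_ofList]; exact pv_ofList_sublist ss2
    have hle := List.Pairwise.sublist hsub hss2le
    have hne : (PySem.List.dedup ss2).Pairwise (· ≠ ·) := PySem.List.nodup_dedup ss2
    exact (hle.and hne).imp (fun h => lt_of_le_of_ne h.1 h.2)
  have hpermud : us.Perm (PySem.List.dedup ss2) :=
    (List.perm_ext_iff_of_nodup husnd (PySem.List.nodup_dedup _)).mpr
      (fun x => (hmemus x).trans ((hmem2 x).symm.trans (PySem.List.mem_dedup ss2 x).symm))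
  have hdedup : PySem.List.dedup ss2 = us := by
    have e1 := PySem.List.sorted_eq_of_perm_of_pairwise_lt (PySem.List.dedup ss2) us
      (fun x => x) hpermud husp
    have e2 := PySem.List.sorted_eq_of_perm_of_pairwise_lt (PySem.List.dedup ss2)
      (PySem.List.dedup ss2) (fun x => x) (List.Perm.refl _) hdedpw
    exact e2.symm.trans e1
  -- A's groups dict
  set dA : PySem.Dict (List Int) (List Int) := (PySem.List.enumerate ss2).foldl
      (fun d p => d.modify p.2 ([] : List Int) (fun l => l ++ [p.1])) PySem.Dict.empty with hdA
  set V : List Int → List Int := fun s =>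
      ((PySem.List.enumerate ss2).filter (fun p => p.2 == s)).map (fun p => p.1) with hVdef
  have hkeysA : dA.keys = PySem.List.dedup ss2 := by
    rw [hdA, PySem.Dict.keys_foldl_modify_key (PySem.List.enumerate ss2) (fun p => p.2)
      ([] : List Int) (fun _ p => fun l => l ++ [p.1]) PySem.Dict.empty]
    simp [PySem.List.map_snd_enumerate, PySem.Dict.keys_empty, PySem.Set.update_nil_left,
      PySem.List.dedup_eq_ofList]
  have hnodupA : dA.keys.Nodup := by rw [hkeysA]; exact PySem.List.nodup_dedup ss2
  have hVA : ∀ k, dA.getD k [] = V k := by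
    intro k
    have hswap : dA = ((PySem.List.enumerate ss2).map Prod.swap).foldl
        (fun d p => d.modify p.1 ([] : List Int) (fun l => l ++ [p.2])) PySem.Dict.empty := by
      rw [List.foldl_map]; rfl
    rw [hswap, PySem.Dict.getD_foldl_modify_append]
    simp [hVdef, List.filter_map, Function.comp_def, List.map_map, Prod.swap]
  have hV_range : ∀ s ∈ us, V s = PySem.List.pyRange (pvOff n us s) (pvOff n us s + n s) := by
    intro s hs
    have h := pv_filter_enum_blocks n f (fun t => by rw [hndef, hfdef]; simp) us 0 s
      husnd hs (fun t _ => hfx t)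
    rw [← hblocks2] at h
    simpa using h
  have hitemsA : dA.items = us.map (fun s =>
      (s, PySem.List.pyRange (pvOff n us s) (pvOff n us s + n s))) := by
    rw [PySem.Dict.items_eq_map_keys dA hnodupA ([] : List Int), hkeysA, hdedup]
    exact List.map_congr_left (fun k hk => by rw [hVA k, hV_range k hk])
  -- B's groups dict
  have hitemsB := pv_items_fold_groups (fun s => buckets.getD s []) us PySem.Dict.empty 0
    husnd (fun s _ => PySem.Dict.contains_empty s)
  have hn' : ∀ t, PySem.List.len (buckets.getD t []) = n t := by
    intro t
    rw [hgetD t, PySem.List.len_eq, List.length_map, hndef]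
  have hnfun : (fun t => PySem.List.len (buckets.getD t [])) = n := funext hn'
  rw [hnfun] at hitemsB
  have hemp : (PySem.Dict.empty : PySem.Dict (List Int) (List Int)).items = [] := rfl
  rw [hemp, List.nil_append] at hitemsB
  simp only [zero_add] at hitemsB
  -- assemble
  rw [hkeysA, hdedup, hitemsA, hitemsB]
  simp only [hn']
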